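-- pv_equiv track=rewrite | github.com/shobro/logic_synthesis | cutNew.py | returnY
-- ===== SOURCE A (Python) =====
-- def returnX(arr,var):
--     count = 0
--     for i in range(len(var)):
--         if arr.count(var[i]) > 0:
--             count = count+1
--     return count
--
-- def returnY(superArray,array,var):
--     superRootX = returnX(superArray,var)    #uses A uNion B =A + B - A intersection B Rule
--     rootX = returnX(array,var)
--     count = 0
--     for i in range(len(var)):
--         if (superArray.count(var[i]) - array.count(var[i])) > 0:
--             count = count + 1
--     Y =  superRootX - rootX + count
--     return Y
-- ===== SOURCE B (Python) =====
-- def returnY(superArray, array, var):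
--     cnt_super = {}
--     for x in superArray:
--         cnt_super[x] = cnt_super.get(x, 0) + 1
--     cnt_arr = {}
--     for x in array:
--         cnt_arr[x] = cnt_arr.get(x, 0) + 1
--     cnt_var = {}
--     for x in var:
--         cnt_var[x] = cnt_var.get(x, 0) + 1
--     total = 0
--     for x, f in cnt_var.items():
--         s = cnt_super.get(x, 0)
--         a = cnt_arr.get(x, 0)
--         total += f * ((1 if s > 0 else 0) - (1 if a > 0 else 0) + (1 if s > a else 0))
--     return total
-- ===== Notes on version B (the rewrite author's own statement) =====
-- stated objective: faster
-- what changed: Replaces the three per-occurrence list.count scans over var with hash-map counters built once for all three lists and a single grouped weighted pass over var's distinct values.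
import Mathlib
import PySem

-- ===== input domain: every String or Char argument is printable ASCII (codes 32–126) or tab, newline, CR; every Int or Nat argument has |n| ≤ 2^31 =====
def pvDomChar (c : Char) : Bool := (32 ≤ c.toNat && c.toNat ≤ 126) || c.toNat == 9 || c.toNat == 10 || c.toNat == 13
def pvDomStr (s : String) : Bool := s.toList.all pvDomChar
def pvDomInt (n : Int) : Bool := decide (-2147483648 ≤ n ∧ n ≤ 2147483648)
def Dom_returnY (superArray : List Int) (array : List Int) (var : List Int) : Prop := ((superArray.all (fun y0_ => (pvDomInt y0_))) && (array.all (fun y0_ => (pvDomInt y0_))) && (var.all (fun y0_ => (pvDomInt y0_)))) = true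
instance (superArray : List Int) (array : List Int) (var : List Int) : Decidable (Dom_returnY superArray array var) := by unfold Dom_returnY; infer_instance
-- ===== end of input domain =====

-- B replaces A's three per-occurrence list.count scans over var by counters built once
-- and a single grouped weighted pass over var's distinct values (objective: faster).

-- ===== PORT A =====
def returnX (arr : List Int) (var : List Int) : Int :=
  (PySem.List.pyRange 0 (var.length : Int) 1).foldl
    (fun count i =>
      if arr.count (PySem.List.pyGetD var i 0) > 0 then count + 1 else count) 0

def returnY (superArray : List Int) (array : List Int) (var : List Int) : Int :=
  let superRootX := returnX superArray var
  let rootX := returnX array var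
  let count := (PySem.List.pyRange 0 (var.length : Int) 1).foldl
    (fun count i =>
      if ((superArray.count (PySem.List.pyGetD var i 0) : Int)
            - (array.count (PySem.List.pyGetD var i 0) : Int)) > 0
      then count + 1 else count) 0
  superRootX - rootX + count

-- ===== PORT B =====
def returnY_alt (superArray : List Int) (array : List Int) (var : List Int) : Int :=
  let cntSuper := superArray.foldl (fun d x => d.insert x (d.getD x 0 + 1)) (PySem.Dict.empty : PySem.Dict Int Int)
  let cntArr := array.foldl (fun d x => d.insert x (d.getD x 0 + 1)) (PySem.Dict.empty : PySem.Dict Int Int)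
  let cntVar := var.foldl (fun d x => d.insert x (d.getD x 0 + 1)) (PySem.Dict.empty : PySem.Dict Int Int)
  cntVar.items.foldl (fun total kf =>
    let s := cntSuper.getD kf.1 0
    let a := cntArr.getD kf.1 0
    total + kf.2 * ((if s > 0 then (1:Int) else 0) - (if a > 0 then 1 else 0)
                     + (if s > a then 1 else 0))) 0

-- ===== PRECONDITION & SPEC =====
def Spec_returnY (superArray : List Int) (array : List Int) (var : List Int) (out : Int) : Prop := out = returnY_alt superArray array var
instance (superArray : List Int) (array : List Int) (var : List Int) (out : Int) : Decidable (Spec_returnY superArray array var out) := by unfold Spec_returnY; infer_instance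

-- ===== CLAIM (what is proved, stated in full; the proofs are below) =====
def Claim_equal_returnY : Prop := ∀ (superArray : List Int) (array : List Int) (var : List Int), Dom_returnY superArray array var → Spec_returnY superArray array var (returnY superArray array var)

-- ===== LEMMAS AND PROOFS =====

-- the per-value weight both programs add for one occurrence of x in var
def pvW (superArray array : List Int) (x : Int) : Int :=
  (if (superArray.count x : Int) > 0 then 1 else 0)
    - (if (array.count x : Int) > 0 then 1 else 0)
    + (if (superArray.count x : Int) > (array.count x : Int) then 1 else 0)

-- Σ over a nodup key list of an indicator concentrated at a ∈ keys
lemma sum_ite_single (keys : List Int) (a : Int) (c : Int)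
    (hnd : keys.Nodup) (ha : a ∈ keys) :
    (keys.map (fun k => if k = a then c else 0)).sum = c := by
  induction keys with
  | nil => cases ha
  | cons k t ih =>
    simp only [List.map_cons, List.sum_cons]
    rcases List.mem_cons.mp ha with h | h
    · subst h
      have hz : (t.map (fun k => if k = a then c else 0)).sum = 0 := by
        have hna : a ∉ t := (List.nodup_cons.mp hnd).1
        rw [List.sum_eq_zero]
        intro y hy
        rcases List.mem_map.mp hy with ⟨z, hz', hzy⟩
        have : z ≠ a := fun e => hna (e ▸ hz')
        simpa [this] using hzy.symm
      simp [hz]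
    · have hk : k ≠ a := by
        rintro rfl; exact (List.nodup_cons.mp hnd).1 h
      rw [ih (List.nodup_cons.mp hnd).2 h]
      simp [hk]

-- grouping: Σ_{k ∈ set(l)} count(l,k)·f k = Σ_{x ∈ l} f x
lemma group_sum (f : Int → Int) (l : List Int) :
    ((PySem.Set.ofList l).map (fun k => (l.count k : Int) * f k)).sum
      = (l.map f).sum := by
  induction l using List.reverseRecOn with
  | nil => simp [PySem.Set.ofList]
  | append_singleton l a ih =>
    have hof : PySem.Set.ofList (l ++ [a]) = PySem.Set.add (PySem.Set.ofList l) a := by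
      simp [PySem.Set.ofList_eq_foldl]
    by_cases hmem : a ∈ PySem.Set.ofList l
    · have hadd : PySem.Set.add (PySem.Set.ofList l) a = PySem.Set.ofList l := by
        simp [PySem.Set.add]
        exact (PySem.Set.mem_ofList l a).mp hmem
      have hcnt : ∀ k : Int, ((l ++ [a]).count k : Int) * f k
          = (l.count k : Int) * f k + (if k = a then f a else 0) := by
        intro k
        rcases eq_or_ne k a with rfl | hne
        · simp [List.count_append]; ring
        · have h0 : List.count k [a] = 0 := List.count_eq_zero.mpr (by simp [hne])
          simp [List.count_append, h0, hne]
      calc ((PySem.Set.ofList (l ++ [a])).map (fun k => ((l ++ [a]).count k : Int) * f k)).sum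
          = ((PySem.Set.ofList l).map (fun k => (l.count k : Int) * f k
              + (if k = a then f a else 0))).sum := by
            rw [hof, hadd]; exact congrArg _ (List.map_congr_left (fun k _ => hcnt k))
        _ = ((PySem.Set.ofList l).map (fun k => (l.count k : Int) * f k)).sum
              + ((PySem.Set.ofList l).map (fun k => if k = a then f a else 0)).sum := by
            rw [← List.sum_map_add]
        _ = (l.map f).sum + f a := by
            rw [ih, sum_ite_single _ a _ (PySem.Set.nodup_ofList l) hmem]
        _ = ((l ++ [a]).map f).sum := by simp
    · have hadd : PySem.Set.add (PySem.Set.ofList l) a = PySem.Set.ofList l ++ [a] := by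
        simp [PySem.Set.add]
        intro h; exact absurd ((PySem.Set.mem_ofList l a).mpr h) hmem
      have hcnt : ∀ k ∈ PySem.Set.ofList l, ((l ++ [a]).count k : Int) * f k
          = (l.count k : Int) * f k := by
        intro k hk
        have hka : k ≠ a := fun e => hmem (e ▸ hk)
        have h0 : List.count k [a] = 0 := List.count_eq_zero.mpr (by simp [hka])
        simp [List.count_append, h0]
      have hcnta : (l.count a) = 0 := by
        have : a ∉ l := fun h => hmem ((PySem.Set.mem_ofList l a).mpr h)
        exact List.count_eq_zero.mpr this
      rw [hof, hadd]
      simp only [List.map_append, List.sum_append, List.map_cons, List.map_nil,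
        List.sum_cons, List.sum_nil]
      rw [List.map_congr_left hcnt, ih]
      simp [List.count_append, hcnta]

-- Σ of the weights over var = A's three counted conditions combined
lemma sum_pvW (superArray array var : List Int) :
    (var.map (pvW superArray array)).sum
      = (var.countP (fun x => decide (superArray.count x > 0)) : Int)
        - (var.countP (fun x => decide (array.count x > 0)) : Int)
        + (var.countP (fun x => decide (((superArray.count x : Int) - (array.count x : Int)) > 0)) : Int) := by
  induction var with
  | nil => simp
  | cons x t ih =>
    simp only [List.map_cons, List.sum_cons, List.countP_cons]
    rw [ih]
    unfold pvW
    simp only [decide_eq_true_eq]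
    push_cast
    split_ifs <;> omega

-- A's three index loops, rewritten as the weight sum over var
lemma returnY_eq_sum (superArray array var : List Int) :
    returnY superArray array var = (var.map (pvW superArray array)).sum := by
  unfold returnY returnX
  dsimp only
  rw [PySem.List.foldl_pyRange_zero_pyGetD' var 0
      (fun count x => if superArray.count x > 0 then count + 1 else count) 0,
    PySem.List.foldl_pyRange_zero_pyGetD' var 0
      (fun count x => if array.count x > 0 then count + 1 else count) 0,
    PySem.List.foldl_pyRange_zero_pyGetD' var 0
      (fun count x => if ((superArray.count x : Int) - (array.count x : Int)) > 0 then count + 1 else count) 0,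
    PySem.List.foldl_ite_add_one (fun x => superArray.count x > 0) var 0,
    PySem.List.foldl_ite_add_one (fun x => array.count x > 0) var 0,
    PySem.List.foldl_ite_add_one (fun x => ((superArray.count x : Int) - (array.count x : Int)) > 0) var 0,
    sum_pvW]
  ring

-- B is the grouped weighted sum over var's distinct values
lemma returnY_alt_eq_sum (superArray array var : List Int) :
    returnY_alt superArray array var
      = ((PySem.Set.ofList var).map (fun k => (var.count k : Int) * pvW superArray array k)).sum := by
  unfold returnY_alt
  dsimp only
  rw [PySem.Dict.foldl_insert_getD_add_one_eq_counter,
    PySem.Dict.foldl_insert_getD_add_one_eq_counter,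
    PySem.Dict.foldl_insert_getD_add_one_eq_counter,
    PySem.Dict.items_counter]
  rw [PySem.List.foldl_add]
  simp only [List.map_map, zero_add]
  refine congrArg _ (List.map_congr_left ?_)
  intro k _
  simp [Function.comp, PySem.Dict.getD_counter, pvW]

-- ===== VERDICT (by name: the statement is the Claim_ definition above) =====
theorem returnY_spec : Claim_equal_returnY := by
  intro superArray array var _
  unfold Spec_returnY
  rw [returnY_eq_sum, returnY_alt_eq_sum, group_sum]
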